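-- pv_equiv track=rewrite | github.com/Rcguen/web-than-so-hoc | backend/app.py | calculate_from_name
-- ===== SOURCE A (Python) =====
-- def calculate_from_name(name):
--     letters = [c.upper() for c in name if c.isalpha()]
--     values = {
--         **dict.fromkeys("AJS", 1), **dict.fromkeys("BKT", 2), **dict.fromkeys("CLU", 3),
--         **dict.fromkeys("DMV", 4), **dict.fromkeys("ENW", 5), **dict.fromkeys("FOX", 6),
--         **dict.fromkeys("GPY", 7), **dict.fromkeys("HQZ", 8), **dict.fromkeys("IR", 9)
--     }
--     nums = [values[c] for c in letters if c in values]
--     return nums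
-- ===== SOURCE B (Python) =====
-- def calculate_from_name(name):
--     nums = []
--     for c in name:
--         if c.isalpha():
--             u = c.upper()
--             if len(u) == 1 and 'A' <= u <= 'Z':
--                 nums.append((ord(u) - 65) % 9 + 1)
--     return nums
-- ===== Notes on version B (the rewrite author's own statement) =====
-- stated objective: idiomatic
-- what changed: Replaces the rebuilt 26-entry lookup dict and the two intermediate list comprehensions with a single pass that maps each letter by the closed-form arithmetic (ord(u)-65)%9+1.
import Mathlib
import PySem

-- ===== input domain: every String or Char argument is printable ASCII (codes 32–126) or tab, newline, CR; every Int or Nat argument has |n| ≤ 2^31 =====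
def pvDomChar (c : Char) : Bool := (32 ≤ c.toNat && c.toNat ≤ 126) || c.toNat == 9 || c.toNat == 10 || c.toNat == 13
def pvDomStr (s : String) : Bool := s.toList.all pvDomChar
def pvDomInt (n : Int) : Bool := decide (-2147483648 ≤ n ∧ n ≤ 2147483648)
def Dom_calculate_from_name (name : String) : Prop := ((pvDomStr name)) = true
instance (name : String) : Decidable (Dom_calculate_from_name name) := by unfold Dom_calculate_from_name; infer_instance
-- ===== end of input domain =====

-- B replaces A's rebuilt 26-entry lookup dict and two comprehensions with one pass using the closed-form (ord(u)-65)%9+1 (idiomatic; same O(n) cost).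


-- ===== PORT A =====
-- the merged dict { **dict.fromkeys("AJS",1), …, **dict.fromkeys("IR",9) }
def pvValues : PySem.Dict Char Int :=
  [("AJS", (1:Int)), ("BKT", 2), ("CLU", 3), ("DMV", 4), ("ENW", 5),
   ("FOX", 6), ("GPY", 7), ("HQZ", 8), ("IR", 9)].foldl
    (fun d p => p.1.toList.foldl (fun d c => d.insert c p.2) d) PySem.Dict.empty

def calculate_from_name (name : String) : List Int :=
  let letters := (name.toList.filter (fun c => PySem.Chars.isalpha c)).map PySem.Chars.upperChar
  letters.foldr (fun c nums => if pvValues.contains c then (pvValues.get? c).getD 0 :: nums else nums) []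

-- ===== PORT B =====
def calculate_from_name_alt (name : String) : List Int :=
  name.toList.foldl (fun nums c =>
    if PySem.Chars.isalpha c then
      let u := PySem.Chars.upperChar c
      if 'A' ≤ u ∧ u ≤ 'Z' then nums ++ [PySem.Int.mod ((u.toNat : Int) - 65) 9 + 1] else nums
    else nums) []

-- ===== PRECONDITION & SPEC =====
def Spec_calculate_from_name (name : String) (out : List Int) : Prop := out = calculate_from_name_alt name
instance (name : String) (out : List Int) : Decidable (Spec_calculate_from_name name out) := by unfold Spec_calculate_from_name; infer_instance

-- ===== CLAIM (what is proved, stated in full; the proofs are below) =====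
def Claim_equal_calculate_from_name : Prop := ∀ (name : String), Dom_calculate_from_name name → Spec_calculate_from_name name (calculate_from_name name)

-- ===== LEMMAS AND PROOFS =====

-- B's loop body
def pvStepB (nums : List Int) (c : Char) : List Int :=
  if PySem.Chars.isalpha c then
    let u := PySem.Chars.upperChar c
    if 'A' ≤ u ∧ u ≤ 'Z' then nums ++ [PySem.Int.mod ((u.toNat : Int) - 65) 9 + 1] else nums
  else nums

theorem pvStepB_eq (nums : List Int) (c : Char) :
    (fun nums c =>
      if PySem.Chars.isalpha c then
        let u := PySem.Chars.upperChar c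
        if 'A' ≤ u ∧ u ≤ 'Z' then nums ++ [PySem.Int.mod ((u.toNat : Int) - 65) 9 + 1] else nums
      else nums) nums c = pvStepB nums c := rfl

theorem pvStepB_acc (nums : List Int) (c : Char) : pvStepB nums c = nums ++ pvStepB [] c := by
  unfold pvStepB
  by_cases h1 : PySem.Chars.isalpha c = true <;>
    simp only [h1, if_true, if_false, Bool.false_eq_true] <;>
    first
    | (split_ifs <;> simp)
    | simp

theorem foldl_stepB_acc (cs : List Char) (nums : List Int) :
    cs.foldl pvStepB nums = nums ++ cs.foldl pvStepB [] := by
  induction cs generalizing nums with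
  | nil => simp
  | cons c cs ih =>
    simp only [List.foldl_cons]
    rw [ih (pvStepB nums c), pvStepB_acc, ih (pvStepB [] c), List.append_assoc]

-- per-character agreement of the two loop bodies (on one char; A's side as a one-char result)
theorem pvChar_agree (c : Char) :
    (if PySem.Chars.isalpha c then
      (if pvValues.contains (PySem.Chars.upperChar c) then [((pvValues.get? (PySem.Chars.upperChar c)).getD 0)] else [])
     else []) = pvStepB [] c := by
  by_cases h : PySem.Chars.isalpha c = true
  · have hr : (65 ≤ c.toNat ∧ c.toNat ≤ 90) ∨ (97 ≤ c.toNat ∧ c.toNat ≤ 122) := by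
      simp only [PySem.Chars.isalpha, PySem.Chars.isupper, PySem.Chars.islower, Bool.or_eq_true,
        Bool.and_eq_true, decide_eq_true_eq, Char.le_def, UInt32.le_iff_toNat_le] at h
      exact h
    have hc : c = Char.ofNat c.toNat := (Char.ofNat_toNat c).symm
    rcases hr with ⟨h1, h2⟩ | ⟨h1, h2⟩ <;>
      (interval_cases hn : c.toNat <;> (rw [hc]; decide))
  · simp only [Bool.not_eq_true] at h
    simp [pvStepB, h]

theorem pvList_eq (cs : List Char) :
    ((cs.filter (fun c => PySem.Chars.isalpha c)).map PySem.Chars.upperChar).foldr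
      (fun c nums => if pvValues.contains c then (pvValues.get? c).getD 0 :: nums else nums) []
    = cs.foldl pvStepB [] := by
  induction cs with
  | nil => rfl
  | cons c cs ih =>
    rw [List.foldl_cons, foldl_stepB_acc, ← ih, ← pvChar_agree c]
    by_cases h : PySem.Chars.isalpha c = true
    · simp only [h, List.filter_cons_of_pos, List.map_cons, List.foldr_cons, if_true]
      split_ifs <;> simp
    · simp [h]

-- ===== VERDICT (by name: the statement is the Claim_ definition above) =====
theorem calculate_from_name_spec : Claim_equal_calculate_from_name := by
  intro name _
  show calculate_from_name name = calculate_from_name_alt name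
  unfold calculate_from_name calculate_from_name_alt
  simp only [pvStepB_eq]
  exact pvList_eq name.toList
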